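-- pv_equiv track=rewrite | github.com/YUJIN-1221/-study-CodingTest | 프로그래머스/lv2/42586. 기능개발/기능개발.py | solution
-- ===== SOURCE A (Python) =====
-- def solution(progresses, speeds):
--     answer = []
--     days = []
--     for i in range(len(progresses)):
--         if (100-progresses[i]) % speeds[i] == 0:
--             days.append(int((100-progresses[i]) // speeds[i]))
--         else:
--             days.append(int((100-progresses[i]) // speeds[i])+1)
--
--     while len(days) > 0:
--         s = days.pop(0)
--         out = 1
--         if len(days) == 0:
--             answer.append(out)
--             break
--         else:
--             while days[0] <= s:
--                 out += 1
--                 days.pop(0)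
--                 if len(days) == 0:
--                     break
--         answer.append(out)
--
--     return answer
-- ===== SOURCE B (Python) =====
-- def solution(progresses, speeds):
--     # days[i] = ceil((100 - p) / s), via Python's floor division: ceil(a/s) == -((-a)//s)
--     days = [-((p - 100) // s) for p, s in zip(progresses, speeds)]
--     answer = []
--     count = 0
--     leader = 0
--     for d in days:
--         if count > 0 and d <= leader:
--             count += 1
--         else:
--             if count > 0:
--                 answer.append(count)
--             leader = d
--             count = 1
--     if count > 0:
--         answer.append(count)
--     return answer
-- ===== Notes on version B (the rewrite author's own statement) =====
-- stated objective: simpler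
-- what changed: Replaces A's index loop with mod-test plus nested destructive pop(0) while-loops by a zip comprehension computing each deploy day as one ceiling division -((p-100)//s) and a single forward scan keeping a (leader, count) pair.
-- outside the precondition, e.g. on solution([50], [0]): A raises ZeroDivisionError, B raises ZeroDivisionError; on solution([50, 50], [10]): A raises IndexError, B returns [1]
import Mathlib
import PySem

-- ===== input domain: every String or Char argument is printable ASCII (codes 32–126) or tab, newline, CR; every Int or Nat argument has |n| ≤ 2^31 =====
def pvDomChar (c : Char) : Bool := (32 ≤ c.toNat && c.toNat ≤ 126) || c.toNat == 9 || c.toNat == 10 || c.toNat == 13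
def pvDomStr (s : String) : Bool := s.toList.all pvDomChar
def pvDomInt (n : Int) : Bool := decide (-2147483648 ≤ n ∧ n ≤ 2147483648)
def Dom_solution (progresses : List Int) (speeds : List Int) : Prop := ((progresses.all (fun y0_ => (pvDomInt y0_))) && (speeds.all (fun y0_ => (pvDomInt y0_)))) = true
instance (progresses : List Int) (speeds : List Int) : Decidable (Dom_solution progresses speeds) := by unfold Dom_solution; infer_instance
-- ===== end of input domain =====

-- B replaces A's destructive pop-based nested while loops by a ceiling-division
-- days list (via -((p-100)//s)) and one foldl scan with a (leader, count) state;
-- objective: simpler (single non-mutating pass over the days list).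

-- ===== PORT A =====
-- inner `while days[0] <= s: out += 1; days.pop(0); if len(days)==0: break`
def solApyInner (s : Int) (out : Int) : List Int → Int × List Int
  | [] => (out, [])
  | d :: rest => if d ≤ s then solApyInner s (out + 1) rest else (out, d :: rest)

theorem solApyInner_len (s out : Int) (l : List Int) :
    (solApyInner s out l).2.length ≤ l.length := by
  induction l generalizing out with
  | nil => simp [solApyInner]
  | cons d rest ih =>
      simp only [solApyInner]
      split
      · exact le_trans (ih (out + 1)) (Nat.le_succ _)
      · simp

-- outer `while len(days) > 0:` loop, accumulating `answer`
def solAWhile (days : List Int) (answer : List Int) : List Int :=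
  match days with
  | [] => answer
  | s :: rest =>
    if rest.isEmpty then answer ++ [1]
    else
      let r := solApyInner s 1 rest
      solAWhile r.2 (answer ++ [r.1])
termination_by days.length
decreasing_by
  have := solApyInner_len s 1 rest
  simp at *; omega

def solution (progresses : List Int) (speeds : List Int) : List Int :=
  let days := (PySem.List.pyRange 0 progresses.length 1).foldl
    (fun days i =>
      if PySem.Int.mod (100 - PySem.List.pyGetD progresses i 0) (PySem.List.pyGetD speeds i 0) = 0 then
        days ++ [PySem.Int.floordiv (100 - PySem.List.pyGetD progresses i 0) (PySem.List.pyGetD speeds i 0)]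
      else
        days ++ [PySem.Int.floordiv (100 - PySem.List.pyGetD progresses i 0) (PySem.List.pyGetD speeds i 0) + 1]) []
  solAWhile days []

-- ===== PORT B =====
-- state: (answer, leader, count)
def solBStep (st : List Int × Int × Int) (d : Int) : List Int × Int × Int :=
  if 0 < st.2.2 ∧ d ≤ st.2.1 then (st.1, st.2.1, st.2.2 + 1)
  else ((if 0 < st.2.2 then st.1 ++ [st.2.2] else st.1), d, 1)

def solBFinish (st : List Int × Int × Int) : List Int :=
  if 0 < st.2.2 then st.1 ++ [st.2.2] else st.1

def solution_alt (progresses : List Int) (speeds : List Int) : List Int :=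
  let days := (progresses.zip speeds).map (fun ps => -(PySem.Int.floordiv (ps.1 - 100) ps.2))
  solBFinish (days.foldl solBStep ([], 0, 0))

-- ===== PRECONDITION & SPEC =====
-- Pre_ excludes exactly the inputs where Python A raises: an index i < len(progresses)
-- with speeds too short (IndexError) or speeds[i] == 0 (ZeroDivisionError).
def Pre_solution (progresses : List Int) (speeds : List Int) : Prop :=
  progresses.length ≤ speeds.length ∧ ∀ s ∈ speeds.take progresses.length, s ≠ 0
instance (progresses : List Int) (speeds : List Int) : Decidable (Pre_solution progresses speeds) := by
  unfold Pre_solution; infer_instance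

def pvWitness_solution : List Int × List Int := ([93, 30, 55], [1, 30, 5])

def Spec_solution (progresses : List Int) (speeds : List Int) (out : List Int) : Prop := out = solution_alt progresses speeds
instance (progresses : List Int) (speeds : List Int) (out : List Int) : Decidable (Spec_solution progresses speeds out) := by unfold Spec_solution; infer_instance

-- ===== CLAIM (what is proved, stated in full; the proofs are below) =====
def Claim_equal_solution : Prop := ∀ (progresses : List Int) (speeds : List Int), Dom_solution progresses speeds → Pre_solution progresses speeds → Spec_solution progresses speeds (solution progresses speeds)

-- ===== LEMMAS AND PROOFS =====

-- ceiling division: A's `a//s` plus 1 unless divisible equals B's `-((-a)//s)`, any s ≠ 0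
theorem ceil_eq_pos (a : Int) {s : Int} (hs : 0 < s) :
    (if PySem.Int.mod a s = 0 then PySem.Int.floordiv a s else PySem.Int.floordiv a s + 1)
      = -(PySem.Int.floordiv (-a) s) := by
  have hqr := PySem.Int.floordiv_mul_add_mod a s
  have h0 := PySem.Int.mod_nonneg a hs
  have h1 := PySem.Int.mod_lt a hs
  by_cases h : PySem.Int.mod a s = 0
  · rw [if_pos h]
    symm
    rw [PySem.Int.neg_floordiv_neg_eq_iff_of_pos hs]
    constructor <;> nlinarith
  · rw [if_neg h]
    have h2 : 0 < PySem.Int.mod a s := lt_of_le_of_ne h0 (Ne.symm h)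
    symm
    rw [PySem.Int.neg_floordiv_neg_eq_iff_of_pos hs]
    constructor <;> nlinarith

theorem ceil_eq (a : Int) {s : Int} (hs : s ≠ 0) :
    (if PySem.Int.mod a s = 0 then PySem.Int.floordiv a s else PySem.Int.floordiv a s + 1)
      = -(PySem.Int.floordiv (-a) s) := by
  rcases lt_or_gt_of_ne hs with h | h
  · have hpos : 0 < -s := by omega
    have e1 : PySem.Int.floordiv a s = PySem.Int.floordiv (-a) (-s) := by
      rw [← PySem.Int.floordiv_neg_neg (-a) (-s)]; simp
    have e2 : PySem.Int.floordiv (-a) s = PySem.Int.floordiv a (-s) := by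
      rw [← PySem.Int.floordiv_neg_neg a (-s)]; simp
    have hmm := PySem.Int.mod_neg_neg a s
    have e3 : PySem.Int.mod a s = 0 ↔ PySem.Int.mod (-a) (-s) = 0 := by omega
    rw [e1, e2]
    rw [show (if PySem.Int.mod a s = 0 then PySem.Int.floordiv (-a) (-s)
          else PySem.Int.floordiv (-a) (-s) + 1)
        = (if PySem.Int.mod (-a) (-s) = 0 then PySem.Int.floordiv (-a) (-s)
          else PySem.Int.floordiv (-a) (-s) + 1) by simp only [e3]]
    have hfin := ceil_eq_pos (-a) hpos
    rw [neg_neg] at hfin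
    exact hfin
  · exact ceil_eq_pos a h

-- the two days lists coincide under Pre_
theorem days_eq (progresses speeds : List Int) (hp : Pre_solution progresses speeds) :
    (PySem.List.pyRange 0 progresses.length 1).foldl
      (fun days i =>
        if PySem.Int.mod (100 - PySem.List.pyGetD progresses i 0) (PySem.List.pyGetD speeds i 0) = 0 then
          days ++ [PySem.Int.floordiv (100 - PySem.List.pyGetD progresses i 0) (PySem.List.pyGetD speeds i 0)]
        else
          days ++ [PySem.Int.floordiv (100 - PySem.List.pyGetD progresses i 0) (PySem.List.pyGetD speeds i 0) + 1]) []
    = (progresses.zip speeds).map (fun ps => -(PySem.Int.floordiv (ps.1 - 100) ps.2)) := by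
  obtain ⟨hlen, hnz⟩ := hp
  set g : Int → Int := fun i =>
    if PySem.Int.mod (100 - PySem.List.pyGetD progresses i 0) (PySem.List.pyGetD speeds i 0) = 0 then
      PySem.Int.floordiv (100 - PySem.List.pyGetD progresses i 0) (PySem.List.pyGetD speeds i 0)
    else
      PySem.Int.floordiv (100 - PySem.List.pyGetD progresses i 0) (PySem.List.pyGetD speeds i 0) + 1
    with hg
  have hfun : (fun (days : List Int) (i : Int) =>
      if PySem.Int.mod (100 - PySem.List.pyGetD progresses i 0) (PySem.List.pyGetD speeds i 0) = 0 then
        days ++ [PySem.Int.floordiv (100 - PySem.List.pyGetD progresses i 0) (PySem.List.pyGetD speeds i 0)]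
      else
        days ++ [PySem.Int.floordiv (100 - PySem.List.pyGetD progresses i 0) (PySem.List.pyGetD speeds i 0) + 1])
      = fun days i => days ++ [g i] := by
    funext days i
    rw [hg]
    by_cases hc : PySem.Int.mod (100 - PySem.List.pyGetD progresses i 0) (PySem.List.pyGetD speeds i 0) = 0
    · simp only [if_pos hc]
    · simp only [if_neg hc]
  rw [hfun]
  have hfold := PySem.List.foldl_append_singleton_eq_map g (PySem.List.pyRange 0 progresses.length 1) []
  rw [hfold, List.nil_append, PySem.List.pyRange_one, List.map_map]
  apply List.ext_getElem
  · simp [hlen]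
  · intro k hk1 hk2
    simp only [List.getElem_map, List.getElem_range, List.getElem_zip, Function.comp]
    have hklt : k < progresses.length := by simpa using hk1
    have hs : k < speeds.length := lt_of_lt_of_le hklt hlen
    have hgp : PySem.List.pyGetD progresses ((0 : Int) + (k : Int)) 0 = progresses[k] := by
      rw [PySem.List.pyGetD_eq_getElem progresses 0 (by omega) (by exact_mod_cast by omega)]
      simp
    have hgs : PySem.List.pyGetD speeds ((0 : Int) + (k : Int)) 0 = speeds[k] := by
      rw [PySem.List.pyGetD_eq_getElem speeds 0 (by omega) (by exact_mod_cast by omega)]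
      simp
    have hnz' : speeds[k] ≠ 0 := by
      apply hnz
      exact List.mem_take_iff_getElem.2 ⟨k, lt_min hklt hs, rfl⟩
    rw [hg]
    simp only [hgp, hgs]
    rw [ceil_eq (100 - progresses[k]) hnz']
    congr 2
    ring

-- ===== grouping: B's one-pass scan equals A's pop loops =====

theorem solAWhile_cons (s : Int) (rest ans : List Int) :
    solAWhile (s :: rest) ans
      = solAWhile (solApyInner s 1 rest).2 (ans ++ [(solApyInner s 1 rest).1]) := by
  cases rest with
  | nil => simp [solAWhile, solApyInner]
  | cons d ds => rw [solAWhile]; simp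

theorem scan_invariant (days : List Int) :
    ∀ (ans : List Int) (s c : Int), 0 < c →
      solBFinish (days.foldl solBStep (ans, s, c))
        = solAWhile (solApyInner s c days).2 (ans ++ [(solApyInner s c days).1]) := by
  induction days with
  | nil =>
      intro ans s c hc
      simp [solBFinish, solApyInner, solAWhile, hc]
  | cons d ds ih =>
      intro ans s c hc
      by_cases h : d ≤ s
      · have : solBStep (ans, s, c) d = (ans, s, c + 1) := by
          simp [solBStep, hc, h]
        have hc1 : (0:Int) < c + 1 := by omega
        rw [List.foldl_cons, this, ih ans s (c + 1) hc1]
        simp [solApyInner, h]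
      · have : solBStep (ans, s, c) d = (ans ++ [c], d, 1) := by
          simp [solBStep, h, hc]
        have h01 : (0:Int) < 1 := by omega
        rw [List.foldl_cons, this, ih (ans ++ [c]) d 1 h01]
        have hinner : solApyInner s c (d :: ds) = (c, d :: ds) := by
          simp [solApyInner, h]
        rw [hinner]
        exact (solAWhile_cons d ds (ans ++ [c])).symm

theorem scan_eq_while (days : List Int) :
    solBFinish (days.foldl solBStep ([], 0, 0)) = solAWhile days [] := by
  cases days with
  | nil => simp [solBFinish, solAWhile]
  | cons d ds =>
      have h0 : solBStep ([], 0, 0) d = ([], d, 1) := by simp [solBStep]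
      have h01 : (0:Int) < 1 := by omega
      rw [List.foldl_cons, h0, scan_invariant ds [] d 1 h01]
      simp
      exact (solAWhile_cons d ds []).symm

-- ===== VERDICT (by name: the statement is the Claim_ definition above) =====
theorem solution_spec : Claim_equal_solution := by
  intro progresses speeds _hdom hpre
  unfold Spec_solution solution solution_alt
  rw [days_eq progresses speeds hpre]
  exact (scan_eq_while _).symm
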